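-- pv_equiv track=rewrite | github.com/rohitmemco/search-tool | backend/server.py | get_osm_shop_category
-- ===== SOURCE A (Python) =====
-- def get_osm_shop_category(query: str) -> str:
--     """Map product query to OpenStreetMap shop tag"""
--     query_lower = query.lower()
--
--     if any(word in query_lower for word in ["phone", "mobile", "iphone", "samsung", "xiaomi", "oneplus", "vivo", "oppo", "realme"]):
--         return "mobile_phone"
--     elif any(word in query_lower for word in ["laptop", "computer", "pc", "desktop", "macbook"]):
--         return "computer"
--     elif any(word in query_lower for word in ["tv", "television", "led", "oled", "electronics", "camera", "headphone", "earphone", "speaker", "audio"]):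
--         return "electronics"
--     elif any(word in query_lower for word in ["watch", "smartwatch"]):
--         return "watches"
--     elif any(word in query_lower for word in ["tile", "bathroom", "kitchen", "flooring", "ceramic"]):
--         return "doityourself"
--     elif any(word in query_lower for word in ["furniture", "sofa", "bed", "table", "chair"]):
--         return "furniture"
--     elif any(word in query_lower for word in ["cloth", "shirt", "pant", "dress", "fashion"]):
--         return "clothes"
--     elif any(word in query_lower for word in ["shoe", "footwear", "sneaker", "sandal"]):
--         return "shoes"
--     elif any(word in query_lower for word in ["jewel", "gold", "diamond", "ring", "necklace"]):
--         return "jewelry"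
--     elif any(word in query_lower for word in ["grocery", "food", "vegetable", "fruit"]):
--         return "supermarket"
--     else:
--         return "electronics"  # Default to electronics for general product searches
-- ===== SOURCE B (Python) =====
-- # Scoring rewrite: flatten the grouped chain into one keyword->priority index,
-- # collect the priorities of ALL keywords occurring in the query, and return the
-- # category of the best (minimum) priority; no ordered branch chain, no early return.
-- CATEGORIES = ["mobile_phone", "computer", "electronics", "watches", "doityourself",
--               "furniture", "clothes", "shoes", "jewelry", "supermarket"]
--
-- KEYWORDS = [
--     ("phone", 0), ("mobile", 0), ("iphone", 0), ("samsung", 0), ("xiaomi", 0),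
--     ("oneplus", 0), ("vivo", 0), ("oppo", 0), ("realme", 0),
--     ("laptop", 1), ("computer", 1), ("pc", 1), ("desktop", 1), ("macbook", 1),
--     ("tv", 2), ("television", 2), ("led", 2), ("oled", 2), ("electronics", 2),
--     ("camera", 2), ("headphone", 2), ("earphone", 2), ("speaker", 2), ("audio", 2),
--     ("watch", 3), ("smartwatch", 3),
--     ("tile", 4), ("bathroom", 4), ("kitchen", 4), ("flooring", 4), ("ceramic", 4),
--     ("furniture", 5), ("sofa", 5), ("bed", 5), ("table", 5), ("chair", 5),
--     ("cloth", 6), ("shirt", 6), ("pant", 6), ("dress", 6), ("fashion", 6),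
--     ("shoe", 7), ("footwear", 7), ("sneaker", 7), ("sandal", 7),
--     ("jewel", 8), ("gold", 8), ("diamond", 8), ("ring", 8), ("necklace", 8),
--     ("grocery", 9), ("food", 9), ("vegetable", 9), ("fruit", 9),
-- ]
--
-- def get_osm_shop_category(query: str) -> str:
--     """Map product query to OpenStreetMap shop tag"""
--     query_lower = query.lower()
--     hits = [pri for kw, pri in KEYWORDS if kw in query_lower]
--     if not hits:
--         return "electronics"  # Default to electronics for general product searches
--     return CATEGORIES[min(hits)]
-- ===== Notes on version B (the rewrite author's own statement) =====
-- stated objective: alternative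
-- what changed: Instead of an ordered if/elif chain that short-circuits on the first matching group, B flattens the groups into one keyword-to-priority index, collects the priorities of all keywords occurring in the query, and returns the category of the minimum priority (default electronics when no keyword occurs).
import Mathlib
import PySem

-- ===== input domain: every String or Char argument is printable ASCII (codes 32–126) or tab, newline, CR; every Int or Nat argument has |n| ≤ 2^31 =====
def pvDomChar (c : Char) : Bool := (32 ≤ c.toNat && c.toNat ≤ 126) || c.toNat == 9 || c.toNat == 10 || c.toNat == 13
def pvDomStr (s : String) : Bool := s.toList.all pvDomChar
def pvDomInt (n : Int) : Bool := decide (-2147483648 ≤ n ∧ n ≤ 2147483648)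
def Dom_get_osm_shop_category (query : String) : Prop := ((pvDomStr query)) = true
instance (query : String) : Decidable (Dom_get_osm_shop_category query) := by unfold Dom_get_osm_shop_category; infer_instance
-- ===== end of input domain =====

-- B replaces A's ordered short-circuit if/elif chain by one flat keyword→priority index,
-- collecting the priorities of all occurring keywords and taking the minimum (alternative decomposition; same cost).

-- ===== PORT A =====
def get_osm_shop_category (query : String) : String :=
  let query_lower := PySem.Str.lower query
  if ["phone", "mobile", "iphone", "samsung", "xiaomi", "oneplus", "vivo", "oppo", "realme"].any
       (fun word => PySem.Str.isIn word query_lower) then "mobile_phone"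
  else if ["laptop", "computer", "pc", "desktop", "macbook"].any
       (fun word => PySem.Str.isIn word query_lower) then "computer"
  else if ["tv", "television", "led", "oled", "electronics", "camera", "headphone", "earphone", "speaker", "audio"].any
       (fun word => PySem.Str.isIn word query_lower) then "electronics"
  else if ["watch", "smartwatch"].any
       (fun word => PySem.Str.isIn word query_lower) then "watches"
  else if ["tile", "bathroom", "kitchen", "flooring", "ceramic"].any
       (fun word => PySem.Str.isIn word query_lower) then "doityourself"
  else if ["furniture", "sofa", "bed", "table", "chair"].any
       (fun word => PySem.Str.isIn word query_lower) then "furniture"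
  else if ["cloth", "shirt", "pant", "dress", "fashion"].any
       (fun word => PySem.Str.isIn word query_lower) then "clothes"
  else if ["shoe", "footwear", "sneaker", "sandal"].any
       (fun word => PySem.Str.isIn word query_lower) then "shoes"
  else if ["jewel", "gold", "diamond", "ring", "necklace"].any
       (fun word => PySem.Str.isIn word query_lower) then "jewelry"
  else if ["grocery", "food", "vegetable", "fruit"].any
       (fun word => PySem.Str.isIn word query_lower) then "supermarket"
  else "electronics"

-- ===== PORT B =====
def pvCategories : List String :=
  ["mobile_phone", "computer", "electronics", "watches", "doityourself",
   "furniture", "clothes", "shoes", "jewelry", "supermarket"]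

def pvKeywords : List (String × Nat) :=
  [ ("phone", 0), ("mobile", 0), ("iphone", 0), ("samsung", 0), ("xiaomi", 0),
    ("oneplus", 0), ("vivo", 0), ("oppo", 0), ("realme", 0),
    ("laptop", 1), ("computer", 1), ("pc", 1), ("desktop", 1), ("macbook", 1),
    ("tv", 2), ("television", 2), ("led", 2), ("oled", 2), ("electronics", 2),
    ("camera", 2), ("headphone", 2), ("earphone", 2), ("speaker", 2), ("audio", 2),
    ("watch", 3), ("smartwatch", 3),
    ("tile", 4), ("bathroom", 4), ("kitchen", 4), ("flooring", 4), ("ceramic", 4),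
    ("furniture", 5), ("sofa", 5), ("bed", 5), ("table", 5), ("chair", 5),
    ("cloth", 6), ("shirt", 6), ("pant", 6), ("dress", 6), ("fashion", 6),
    ("shoe", 7), ("footwear", 7), ("sneaker", 7), ("sandal", 7),
    ("jewel", 8), ("gold", 8), ("diamond", 8), ("ring", 8), ("necklace", 8),
    ("grocery", 9), ("food", 9), ("vegetable", 9), ("fruit", 9) ]

def get_osm_shop_category_alt (query : String) : String :=
  let query_lower := PySem.Str.lower query
  let hits : List Nat := pvKeywords.filterMap
    (fun p => if PySem.Str.isIn p.1 query_lower then some p.2 else none)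
  match PySem.List.min? hits (fun x => x) with
  | none => "electronics"
  | some m => (PySem.List.pyGet? pvCategories (m : Int)).getD "electronics"  -- CATEGORIES[min(hits)]; index always in range, getD is a totality guard

-- ===== PRECONDITION & SPEC =====
def Spec_get_osm_shop_category (query : String) (out : String) : Prop := out = get_osm_shop_category_alt query
instance (query : String) (out : String) : Decidable (Spec_get_osm_shop_category query out) := by unfold Spec_get_osm_shop_category; infer_instance

-- ===== CLAIM =====
def Claim_equal_get_osm_shop_category : Prop := ∀ (query : String), Dom_get_osm_shop_category query → Spec_get_osm_shop_category query (get_osm_shop_category query)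

-- ===== LEMMAS AND PROOFS =====

-- the grouped table A's chain walks, used only by the proof
def pvTable : List (List String × String) :=
  [ (["phone", "mobile", "iphone", "samsung", "xiaomi", "oneplus", "vivo", "oppo", "realme"], "mobile_phone"),
    (["laptop", "computer", "pc", "desktop", "macbook"], "computer"),
    (["tv", "television", "led", "oled", "electronics", "camera", "headphone", "earphone", "speaker", "audio"], "electronics"),
    (["watch", "smartwatch"], "watches"),
    (["tile", "bathroom", "kitchen", "flooring", "ceramic"], "doityourself"),
    (["furniture", "sofa", "bed", "table", "chair"], "furniture"),
    (["cloth", "shirt", "pant", "dress", "fashion"], "clothes"),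
    (["shoe", "footwear", "sneaker", "sandal"], "shoes"),
    (["jewel", "gold", "diamond", "ring", "necklace"], "jewelry"),
    (["grocery", "food", "vegetable", "fruit"], "supermarket") ]

def pvChain (q : String) : List (List String × String) → String
  | [] => "electronics"
  | (ws, c) :: rest =>
      if ws.any (fun word => PySem.Str.isIn word q) then c else pvChain q rest

def pvFlat : Nat → List (List String × String) → List (String × Nat)
  | _, [] => []
  | k, (ws, _) :: rest => ws.map (fun w => (w, k)) ++ pvFlat (k + 1) rest

def pvHits (q : String) : Nat → List (List String × String) → List Nat
  | _, [] => []
  | k, (ws, _) :: rest =>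
      (ws.filter (fun w => PySem.Str.isIn w q)).map (fun _ => k) ++ pvHits q (k + 1) rest

theorem pvKeywords_eq_flat : pvKeywords = pvFlat 0 pvTable := by rfl

theorem pvFilterMap_group (q : String) (k : Nat) (ws : List String) :
    (ws.map (fun w => (w, k))).filterMap
        (fun p : String × Nat => if PySem.Str.isIn p.1 q then some p.2 else none)
      = (ws.filter (fun w => PySem.Str.isIn w q)).map (fun _ => k) := by
  induction ws with
  | nil => rfl
  | cons w ws ih =>
      simp only [List.map_cons, List.filterMap_cons, List.filter_cons]
      by_cases h : PySem.Str.isIn w q = true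
      · rw [if_pos h, if_pos h, List.map_cons, ih]
      · rw [if_neg h, if_neg h, ih]

theorem pvFilterMap_flat (q : String) (table : List (List String × String)) (k : Nat) :
    (pvFlat k table).filterMap
        (fun p : String × Nat => if PySem.Str.isIn p.1 q then some p.2 else none)
      = pvHits q k table := by
  induction table generalizing k with
  | nil => rfl
  | cons g rest ih =>
      obtain ⟨ws, c⟩ := g
      simp only [pvFlat, pvHits, List.filterMap_append, pvFilterMap_group, ih]

theorem pvHits_ge (q : String) (table : List (List String × String)) (k : Nat) :
    ∀ m ∈ pvHits q k table, k ≤ m := by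
  induction table generalizing k with
  | nil => intro m hm; simp [pvHits] at hm
  | cons g rest ih =>
      obtain ⟨ws, c⟩ := g
      intro m hm
      simp only [pvHits, List.mem_append, List.mem_map] at hm
      rcases hm with ⟨_, _, rfl⟩ | hm
      · exact le_refl k
      · exact Nat.le_of_succ_le (ih (k + 1) m hm)

theorem pvMain (q : String) (table : List (List String × String)) (k : Nat)
    (pre : List String) (hpre : pre.length = k) :
    (match PySem.List.min? (pvHits q k table) (fun x => x) with
     | none => "electronics"
     | some m => (PySem.List.pyGet? (pre ++ table.map Prod.snd) (m : Int)).getD "electronics")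
      = pvChain q table := by
  induction table generalizing k pre with
  | nil =>
      have : pvHits q k ([] : List (List String × String)) = [] := rfl
      rw [this]
      have h0 : PySem.List.min? ([] : List Nat) (fun x => x) = none :=
        (PySem.List.min?_eq_none_iff _ _).mpr rfl
      rw [h0]
      rfl
  | cons g rest ih =>
      obtain ⟨ws, c⟩ := g
      by_cases hb : ws.any (fun word => PySem.Str.isIn word q) = true
      · -- head group matches: min of hits is k, and category k is c
        obtain ⟨w, hw, hwin⟩ := List.any_eq_true.mp hb
        have hfe : ws.filter (fun w => PySem.Str.isIn w q) ≠ [] := by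
          intro h
          have hmem := (List.mem_filter (p := fun w => PySem.Str.isIn w q)).mpr ⟨hw, hwin⟩
          rw [h] at hmem
          exact List.not_mem_nil hmem
        obtain ⟨w0, t0, hft⟩ := List.exists_cons_of_ne_nil hfe
        have hph : pvHits q k ((ws, c) :: rest)
            = k :: (t0.map (fun _ => k) ++ pvHits q (k + 1) rest) := by
          simp only [pvHits, hft, List.map_cons, List.cons_append]
        have hkmem : k ∈ pvHits q k ((ws, c) :: rest) := by
          rw [hph]; exact List.mem_cons_self
        have hne : pvHits q k ((ws, c) :: rest) ≠ [] := by
          rw [hph]; exact List.cons_ne_nil _ _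
        obtain ⟨m, hm⟩ : ∃ m, PySem.List.min? (pvHits q k ((ws, c) :: rest)) (fun x => x) = some m := by
          cases hmin : PySem.List.min? (pvHits q k ((ws, c) :: rest)) (fun x => x) with
          | none => exact absurd ((PySem.List.min?_eq_none_iff _ _).mp hmin) hne
          | some m => exact ⟨m, rfl⟩
        have hmmem : m ∈ pvHits q k ((ws, c) :: rest) := PySem.List.min?_mem hm
        have hmk : m = k := le_antisymm
          (PySem.List.min?_isMin hm k hkmem)
          (pvHits_ge q ((ws, c) :: rest) k m hmmem)
        have hget : PySem.List.pyGet? (pre ++ ((ws, c) :: rest).map Prod.snd) (k : Int) = some c := by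
          rw [PySem.List.pyGet?_natCast]
          rw [List.getElem?_append_right (by omega : pre.length ≤ k)]
          simp [hpre]
        rw [hm, hmk]
        show (PySem.List.pyGet? (pre ++ ((ws, c) :: rest).map Prod.snd) (k : Int)).getD "electronics"
          = pvChain q ((ws, c) :: rest)
        rw [hget]
        simp only [Option.getD_some, pvChain]
        rw [if_pos hb]
      · -- head group does not match: its hits are empty, recurse
        have hfil : ws.filter (fun w => PySem.Str.isIn w q) = [] := by
          rw [List.filter_eq_nil_iff]
          intro w hw
          exact fun h => hb (List.any_eq_true.mpr ⟨w, hw, h⟩)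
        have hhits : pvHits q k ((ws, c) :: rest) = pvHits q (k + 1) rest := by
          simp only [pvHits, hfil, List.map_nil, List.nil_append]
        have hcats : pre ++ ((ws, c) :: rest).map Prod.snd
            = (pre ++ [c]) ++ rest.map Prod.snd := by
          simp
        rw [hhits, hcats]
        rw [ih (k + 1) (pre ++ [c]) (by simp [hpre])]
        simp only [pvChain]
        rw [if_neg hb]

theorem pvA_eq_chain (query : String) :
    get_osm_shop_category query = pvChain (PySem.Str.lower query) pvTable := by
  rfl

-- ===== VERDICT =====
theorem get_osm_shop_category_spec : Claim_equal_get_osm_shop_category := by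
  intro query _
  show get_osm_shop_category query = get_osm_shop_category_alt query
  rw [pvA_eq_chain]
  simp only [get_osm_shop_category_alt]
  rw [pvKeywords_eq_flat, pvFilterMap_flat]
  rw [show pvCategories = ([] : List String) ++ pvTable.map Prod.snd from rfl]
  exact (pvMain (PySem.Str.lower query) pvTable 0 [] rfl).symm
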